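-- pv_equiv track=rewrite | github.com/SavageCooPigeonX/keystroke-telemetry | src/prompt_enricher_seq024_v001.py | _find_insert_anchor
-- ===== SOURCE A (Python) =====
-- def _find_insert_anchor(text: str) -> int:
--     """Insert before the first managed block that still exists in the file."""
--     markers = (
--         '<!-- pigeon:task-context -->',
--         '<!-- pigeon:task-queue -->',
--         '<!-- pigeon:operator-state -->',
--         '<!-- pigeon:prompt-telemetry -->',
--         '<!-- pigeon:auto-index -->',
--     )
--     hits = [text.find(marker) for marker in markers if text.find(marker) >= 0]
--     return min(hits) if hits else -1
-- ===== SOURCE B (Python) =====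
-- def _find_insert_anchor(text: str) -> int:
--     """Insert before the first managed block that still exists in the file."""
--     markers = (
--         '<!-- pigeon:task-context -->',
--         '<!-- pigeon:task-queue -->',
--         '<!-- pigeon:operator-state -->',
--         '<!-- pigeon:prompt-telemetry -->',
--         '<!-- pigeon:auto-index -->',
--     )
--     # Single left-to-right pass: every marker starts with '<', so hop between
--     # '<' positions and return the first one where some marker begins.
--     i = text.find('<')
--     while i != -1:
--         for marker in markers:
--             if text.startswith(marker, i):
--                 return i
--         i = text.find('<', i + 1)
--     return -1
-- ===== Notes on version B (the rewrite author's own statement) =====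
-- stated objective: alternative
-- what changed: Instead of running five full find scans and taking the min of the hits, B makes one left-to-right pass that hops between '<' positions and returns the first position where any marker begins (early exit at the leftmost occurrence).
import Mathlib
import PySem

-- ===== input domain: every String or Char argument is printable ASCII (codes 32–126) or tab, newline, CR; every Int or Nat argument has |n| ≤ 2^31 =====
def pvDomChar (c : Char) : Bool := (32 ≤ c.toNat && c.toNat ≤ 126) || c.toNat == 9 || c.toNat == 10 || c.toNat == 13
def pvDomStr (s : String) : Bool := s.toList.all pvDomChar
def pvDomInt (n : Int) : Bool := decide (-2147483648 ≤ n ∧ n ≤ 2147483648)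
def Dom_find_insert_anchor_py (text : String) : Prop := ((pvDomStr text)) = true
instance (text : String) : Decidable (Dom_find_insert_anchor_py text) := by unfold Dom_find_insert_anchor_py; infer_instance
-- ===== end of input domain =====

-- B replaces five separate find scans + min by one left-to-right pass hopping between '<' positions
-- and returning the first position where any marker begins (alternative traversal, same result).


-- ===== PORT A =====
def markersA : List String :=
  ["<!-- pigeon:task-context -->",
   "<!-- pigeon:task-queue -->",
   "<!-- pigeon:operator-state -->",
   "<!-- pigeon:prompt-telemetry -->",
   "<!-- pigeon:auto-index -->"]

-- hits = [text.find(m) for m in markers if text.find(m) >= 0]; min(hits) if hits else -1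
def find_insert_anchor_py (text : String) : Int :=
  let hits := (markersA.filter (fun m => 0 ≤ PySem.Str.find text m)).map
    (fun m => PySem.Str.find text m)
  match PySem.List.min? hits (fun v => v) with
  | some v => v
  | none => -1

-- ===== PORT B =====
def markersB : List String :=
  ["<!-- pigeon:task-context -->",
   "<!-- pigeon:task-queue -->",
   "<!-- pigeon:operator-state -->",
   "<!-- pigeon:prompt-telemetry -->",
   "<!-- pigeon:auto-index -->"]

-- text.startswith(marker, i) for 0 ≤ i: exact as prefix test on the suffix starting at i
def pvAnyMarkerAt (s : List Char) (i : Nat) : Bool :=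
  markersB.any (fun m => PySem.Chars.startswith (s.drop i) m.toList)

-- the while loop; fuel (= number of remaining positions) only makes it total, never reached
def pvGo (s : List Char) : Nat → Nat → Int
  | 0, _ => -1
  | fuel + 1, i =>
    if pvAnyMarkerAt s i then (i : Int)
    else
      let j := PySem.Chars.findFrom s ['<'] ((i : Int) + 1) none
      if j = -1 then -1 else pvGo s fuel j.toNat

def find_insert_anchor_py_alt (text : String) : Int :=
  let s := text.toList
  let i0 := PySem.Chars.find s ['<']
  if i0 = -1 then -1 else pvGo s s.length i0.toNat

-- ===== PRECONDITION & SPEC =====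
def Spec_find_insert_anchor_py (text : String) (out : Int) : Prop := out = find_insert_anchor_py_alt text
instance (text : String) (out : Int) : Decidable (Spec_find_insert_anchor_py text out) := by unfold Spec_find_insert_anchor_py; infer_instance

-- ===== CLAIM (what is proved, stated in full; the proofs are below) =====
def Claim_equal_find_insert_anchor_py : Prop := ∀ (text : String), Dom_find_insert_anchor_py text → Spec_find_insert_anchor_py text (find_insert_anchor_py text)

-- ===== LEMMAS AND PROOFS =====

-- reference: first position (if any) where some marker begins
def pvFirstHit : List Char → Option Nat
  | [] => none
  | c :: rest =>
    if pvAnyMarkerAt (c :: rest) 0 then some 0 else (pvFirstHit rest).map (· + 1)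

def pvFhVal (s : List Char) : Int :=
  match pvFirstHit s with
  | some j => (j : Int)
  | none => -1

lemma pvAnyMarkerAt_iff (s : List Char) (i : Nat) :
    pvAnyMarkerAt s i = true ↔ ∃ m ∈ markersB, m.toList <+: s.drop i := by
  simp [pvAnyMarkerAt, List.any_eq_true, PySem.Chars.startswith_iff]

lemma pvAnyMarkerAt_succ (c : Char) (s : List Char) (i : Nat) :
    pvAnyMarkerAt (c :: s) (i + 1) = pvAnyMarkerAt s i := by
  simp [pvAnyMarkerAt]

lemma pvHit_starts_lt (s : List Char) (j : Nat) (h : pvAnyMarkerAt s j = true) :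
    ['<'] <+: s.drop j := by
  rw [pvAnyMarkerAt_iff] at h
  obtain ⟨m, hm, hp⟩ := h
  refine List.IsPrefix.trans ?_ hp
  fin_cases hm <;> decide

lemma pvFh_none (s : List Char) (h : pvFirstHit s = none) :
    ∀ j, pvAnyMarkerAt s j = false := by
  intro j
  induction s generalizing j with
  | nil =>
    rcases hb : pvAnyMarkerAt [] j with _ | _
    · rfl
    · rw [pvAnyMarkerAt_iff] at hb
      obtain ⟨m, hm, hp⟩ := hb
      simp at hp
      fin_cases hm <;> simp_all
  | cons c rest ih =>
    unfold pvFirstHit at h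
    by_cases h0 : pvAnyMarkerAt (c :: rest) 0 = true
    · simp [h0] at h
    · simp only [Bool.not_eq_true] at h0
      simp [h0] at h
      match j with
      | 0 => exact h0
      | j + 1 => rw [pvAnyMarkerAt_succ]; exact ih h j

lemma pvFh_some (s : List Char) (j : Nat) (h : pvFirstHit s = some j) :
    pvAnyMarkerAt s j = true ∧ ∀ k < j, pvAnyMarkerAt s k = false := by
  induction s generalizing j with
  | nil => simp [pvFirstHit] at h
  | cons c rest ih =>
    unfold pvFirstHit at h
    by_cases h0 : pvAnyMarkerAt (c :: rest) 0 = true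
    · simp [h0] at h
      subst h
      exact ⟨h0, by omega⟩
    · simp only [Bool.not_eq_true] at h0
      simp [h0] at h
      obtain ⟨j', hj', rfl⟩ := h
      obtain ⟨h1, h2⟩ := ih j' hj'
      refine ⟨by rw [pvAnyMarkerAt_succ]; exact h1, ?_⟩
      intro k hk
      match k with
      | 0 => exact h0
      | k + 1 => rw [pvAnyMarkerAt_succ]; exact h2 k (by omega)

lemma pvFh_eq_some (s : List Char) (j : Nat) (hj : pvAnyMarkerAt s j = true)
    (hmin : ∀ k < j, pvAnyMarkerAt s k = false) : pvFirstHit s = some j := by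
  induction s generalizing j with
  | nil =>
    exfalso
    rw [pvAnyMarkerAt_iff] at hj
    obtain ⟨m, hm, hp⟩ := hj
    simp at hp
    fin_cases hm <;> simp_all
  | cons c rest ih =>
    match j with
    | 0 => simp [pvFirstHit, hj]
    | j + 1 =>
      have h0 : pvAnyMarkerAt (c :: rest) 0 = false := hmin 0 (by omega)
      have hrest : pvFirstHit rest = some j := by
        refine ih j (by rw [← pvAnyMarkerAt_succ c]; exact hj) ?_
        intro k hk
        rw [← pvAnyMarkerAt_succ c]
        exact hmin (k + 1) (by omega)
      simp [pvFirstHit, h0, hrest]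


lemma pvFindSpec (s sub : List Char) (h : PySem.Chars.find s sub ≠ -1) :
    0 ≤ PySem.Chars.find s sub ∧ sub <+: s.drop (PySem.Chars.find s sub).toNat ∧
      ∀ i : Nat, i < (PySem.Chars.find s sub).toNat → ¬ sub <+: s.drop i := by
  have hspec := PySem.Chars.findFrom_natCast_spec s sub 0 (Nat.zero_le _)
  rw [Nat.cast_zero, PySem.Chars.findFrom_zero] at hspec
  obtain ⟨h0, hpre, hmin⟩ := hspec h
  exact ⟨h0, hpre, fun i hi => hmin i (Nat.zero_le _) hi⟩

lemma pvFind_ne_neg_one (s sub : List Char) (j : Nat) (hp : sub <+: s.drop j) :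
    PySem.Chars.find s sub ≠ -1 := by
  rw [Ne, PySem.Chars.find_eq_neg_one_iff]
  intro hc
  exact hc ((PySem.Chars.isIn_iff_infix _ _).mp
    ((PySem.Chars.exists_prefix_drop_iff_isIn _ _).mp ⟨j, hp⟩))

lemma pvMarkersAB : markersA = markersB := rfl

lemma pvA_eq (text : String) : find_insert_anchor_py text = pvFhVal text.toList := by
  cases h : pvFirstHit text.toList with
  | none =>
    have hall := pvFh_none text.toList h
    have hfind : ∀ m ∈ markersA, PySem.Chars.find text.toList m.toList = -1 := by
      intro m hm
      rw [PySem.Chars.find_eq_neg_one_iff]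
      intro hinf
      obtain ⟨j, hj⟩ := (PySem.Chars.exists_prefix_drop_iff_isIn _ _).mpr
        ((PySem.Chars.isIn_iff_infix _ _).mpr hinf)
      have hhit : pvAnyMarkerAt text.toList j = true :=
        (pvAnyMarkerAt_iff _ _).mpr ⟨m, pvMarkersAB ▸ hm, hj⟩
      rw [hall j] at hhit
      exact Bool.false_ne_true hhit
    have h1 := hfind _ (show "<!-- pigeon:task-context -->" ∈ markersA by simp [markersA])
    have h2 := hfind _ (show "<!-- pigeon:task-queue -->" ∈ markersA by simp [markersA])
    have h3 := hfind _ (show "<!-- pigeon:operator-state -->" ∈ markersA by simp [markersA])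
    have h4 := hfind _ (show "<!-- pigeon:prompt-telemetry -->" ∈ markersA by simp [markersA])
    have h5 := hfind _ (show "<!-- pigeon:auto-index -->" ∈ markersA by simp [markersA])
    simp at h1 h2 h3 h4 h5
    simp [find_insert_anchor_py, markersA, pvFhVal, h, List.filter, PySem.Str.find_eq,
      h1, h2, h3, h4, h5, PySem.List.min?]
  | some j =>
    obtain ⟨hj, hmin⟩ := pvFh_some text.toList j h
    obtain ⟨m₀, hm₀, hp₀⟩ := (pvAnyMarkerAt_iff _ _).mp hj
    have hge : ∀ m ∈ markersA, 0 ≤ PySem.Chars.find text.toList m.toList →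
        (j : Int) ≤ PySem.Chars.find text.toList m.toList := by
      intro m hm hpos
      have hne : PySem.Chars.find text.toList m.toList ≠ -1 := by omega
      obtain ⟨h0, hpre, -⟩ := pvFindSpec _ _ hne
      have hhit : pvAnyMarkerAt text.toList (PySem.Chars.find text.toList m.toList).toNat = true :=
        (pvAnyMarkerAt_iff _ _).mpr ⟨m, pvMarkersAB ▸ hm, hpre⟩
      have hnlt : ¬ (PySem.Chars.find text.toList m.toList).toNat < j := by
        intro hlt
        rw [hmin _ hlt] at hhit
        exact Bool.false_ne_true hhit
      omega
    have hm₀find : PySem.Chars.find text.toList m₀.toList = (j : Int) := by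
      have hne := pvFind_ne_neg_one _ _ _ hp₀
      obtain ⟨h0, hpre, hminf⟩ := pvFindSpec _ _ hne
      have hle : (PySem.Chars.find text.toList m₀.toList).toNat ≤ j := by
        by_contra hlt
        exact hminf j (by omega) hp₀
      have hgej := hge m₀ (pvMarkersAB ▸ hm₀) h0
      omega
    have hjmem : (j : Int) ∈ (markersA.filter (fun m => 0 ≤ PySem.Str.find text m)).map
        (fun m => PySem.Str.find text m) := by
      refine List.mem_map.mpr ⟨m₀, List.mem_filter.mpr ⟨pvMarkersAB ▸ hm₀, ?_⟩, ?_⟩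
      · simp [PySem.Str.find_eq, hm₀find]
      · simp [PySem.Str.find_eq, hm₀find]
    have hall' : ∀ y ∈ (markersA.filter (fun m => 0 ≤ PySem.Str.find text m)).map
        (fun m => PySem.Str.find text m), (j : Int) ≤ y := by
      intro y hy
      obtain ⟨m, hmf, rfl⟩ := List.mem_map.mp hy
      obtain ⟨hm, hpos⟩ := List.mem_filter.mp hmf
      have hpos' : 0 ≤ PySem.Chars.find text.toList m.toList := by
        rw [← PySem.Str.find_eq]
        exact of_decide_eq_true hpos
      rw [PySem.Str.find_eq]
      exact hge m hm hpos'
    unfold find_insert_anchor_py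
    rw [pvFhVal, h]
    cases hmq : PySem.List.min? ((markersA.filter (fun m => 0 ≤ PySem.Str.find text m)).map
        (fun m => PySem.Str.find text m)) (fun v => v) with
    | none =>
      rw [PySem.List.min?_eq_none_iff] at hmq
      simp only [hmq] at hjmem
      simp at hjmem
    | some v =>
      have hvle : v ≤ (j : Int) := PySem.List.min?_isMin hmq _ hjmem
      have hlev : (j : Int) ≤ v := hall' v (PySem.List.min?_mem hmq)
      simp only [hmq]
      omega


lemma pvGo_eq (s : List Char) (fuel i : Nat) (hi : i < s.length)
    (hfuel : s.length - i ≤ fuel) (hinv : ∀ k < i, pvAnyMarkerAt s k = false) :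
    pvGo s fuel i = pvFhVal s := by
  induction fuel generalizing i with
  | zero => omega
  | succ fuel ih =>
    unfold pvGo
    by_cases hhit : pvAnyMarkerAt s i = true
    · rw [if_pos hhit, pvFhVal, pvFh_eq_some s i hhit hinv]
    · simp only [Bool.not_eq_true] at hhit
      rw [if_neg (by simp [hhit])]
      have hk1 : i + 1 ≤ s.length := by omega
      have hcast : ((i : Int) + 1) = ((i + 1 : Nat) : Int) := by push_cast; ring
      by_cases hjz : PySem.Chars.findFrom s ['<'] ((i : Int) + 1) none = -1
      · rw [if_pos hjz]
        rw [hcast, PySem.Chars.findFrom_natCast_eq_neg_one_iff s _ _ hk1] at hjz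
        have hnone : ∀ k, pvAnyMarkerAt s k = false := by
          intro k
          rcases hb : pvAnyMarkerAt s k with _ | _
          · rfl
          · exfalso
            have hlt := pvHit_starts_lt s k hb
            rcases Nat.lt_or_ge k (i + 1) with hki | hki
            · rcases Nat.lt_or_ge k i with h' | h'
              · rw [hinv k h'] at hb; exact Bool.false_ne_true hb
              · have hkeq : k = i := by omega
                subst hkeq; rw [hhit] at hb; exact Bool.false_ne_true hb
            · apply hjz
              have hdd : s.drop k = (s.drop (i + 1)).drop (k - (i + 1)) := by
                rw [List.drop_drop]; congr 1; omega
              exact (PySem.Chars.isIn_iff_infix _ _).mp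
                ((PySem.Chars.exists_prefix_drop_iff_isIn _ _).mp
                  ⟨k - (i + 1), by rw [← hdd]; exact hlt⟩)
        cases hfh : pvFirstHit s with
        | none => simp [pvFhVal, hfh]
        | some j =>
          exfalso
          have hthis := (pvFh_some s j hfh).1
          rw [hnone j] at hthis
          exact Bool.false_ne_true hthis
      · rw [if_neg hjz]
        rw [hcast] at hjz ⊢
        obtain ⟨hge, hpre, hminf⟩ := PySem.Chars.findFrom_natCast_spec s ['<'] (i + 1) hk1 hjz
        have hJlen : (PySem.Chars.findFrom s ['<'] ((i + 1 : Nat) : Int) none).toNat < s.length := by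
          by_contra hc
          rw [Nat.not_lt] at hc
          rw [List.drop_eq_nil_of_le hc] at hpre
          simp at hpre
        refine ih _ hJlen (by omega) ?_
        intro k hk
        rcases Nat.lt_or_ge k (i + 1) with hki | hki
        · rcases Nat.lt_or_ge k i with h' | h'
          · exact hinv k h'
          · have hkeq : k = i := by omega
            subst hkeq; exact hhit
        · rcases hb : pvAnyMarkerAt s k with _ | _
          · rfl
          · exact absurd (pvHit_starts_lt s k hb) (hminf k hki hk)



lemma pvB_eq (text : String) : find_insert_anchor_py_alt text = pvFhVal text.toList := by
  unfold find_insert_anchor_py_alt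
  by_cases h0 : PySem.Chars.find text.toList ['<'] = -1
  · rw [if_pos h0]
    rw [PySem.Chars.find_eq_neg_one_iff] at h0
    have hnone : ∀ k, pvAnyMarkerAt text.toList k = false := by
      intro k
      rcases hb : pvAnyMarkerAt text.toList k with _ | _
      · rfl
      · exfalso
        apply h0
        exact (PySem.Chars.isIn_iff_infix _ _).mp
          ((PySem.Chars.exists_prefix_drop_iff_isIn _ _).mp ⟨k, pvHit_starts_lt text.toList k hb⟩)
    cases hfh : pvFirstHit text.toList with
    | none => simp [pvFhVal, hfh]
    | some j =>
      exfalso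
      have hthis := (pvFh_some _ j hfh).1
      rw [hnone j] at hthis
      exact Bool.false_ne_true hthis
  · rw [if_neg h0]
    obtain ⟨hge, hpre, hminf⟩ := pvFindSpec text.toList ['<'] h0
    have hlen : (PySem.Chars.find text.toList ['<']).toNat < text.toList.length := by
      by_contra hc
      rw [Nat.not_lt] at hc
      rw [List.drop_eq_nil_of_le hc] at hpre
      simp at hpre
    refine pvGo_eq _ _ _ hlen (by omega) ?_
    intro k hk
    rcases hb : pvAnyMarkerAt text.toList k with _ | _
    · rfl
    · exact absurd (pvHit_starts_lt text.toList k hb) (hminf k hk)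


-- ===== VERDICT (by name: the statement is the Claim_ definition above) =====
theorem find_insert_anchor_py_spec : Claim_equal_find_insert_anchor_py := by
  intro text _
  unfold Spec_find_insert_anchor_py
  rw [pvA_eq, pvB_eq]
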